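-- pv_equiv track=rewrite | github.com/atomicbomber-git/malay-sampa-code-generator | syllable.py | split_by_consecutive_vowels
-- ===== SOURCE A (Python) =====
-- VOWELS = 'aiueo1234('
--
-- def split_by_consecutive_vowels(part):
--     result = []
--     temp = ""
--
--     for i, char in enumerate(part):
--
--         temp += char
--
--         if (i + 1 >= len(part)):
--             result.append(temp)
--             break
--
--         if (part[i] in VOWELS and part[i + 1] in VOWELS):
--             result.append(temp)
--             temp = ""
--
--     return result
-- ===== SOURCE B (Python) =====
-- VOWELS = 'aiueo1234('
--
-- def split_by_consecutive_vowels(part):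
--     # Boundary-table decomposition: precompute cut positions, then slice.
--     if not part:
--         return []
--     cuts = [i + 1 for i in range(len(part) - 1)
--             if part[i] in VOWELS and part[i + 1] in VOWELS]
--     segments = []
--     start = 0
--     for cut in cuts:
--         segments.append(part[start:cut])
--         start = cut
--     segments.append(part[start:])
--     return segments
-- ===== Notes on version B (the rewrite author's own statement) =====
-- stated objective: simpler
-- what changed: Replaces character-by-character temp accumulation with a precomputed table of cut positions followed by slicing the string between consecutive cuts.
import Mathlib
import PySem

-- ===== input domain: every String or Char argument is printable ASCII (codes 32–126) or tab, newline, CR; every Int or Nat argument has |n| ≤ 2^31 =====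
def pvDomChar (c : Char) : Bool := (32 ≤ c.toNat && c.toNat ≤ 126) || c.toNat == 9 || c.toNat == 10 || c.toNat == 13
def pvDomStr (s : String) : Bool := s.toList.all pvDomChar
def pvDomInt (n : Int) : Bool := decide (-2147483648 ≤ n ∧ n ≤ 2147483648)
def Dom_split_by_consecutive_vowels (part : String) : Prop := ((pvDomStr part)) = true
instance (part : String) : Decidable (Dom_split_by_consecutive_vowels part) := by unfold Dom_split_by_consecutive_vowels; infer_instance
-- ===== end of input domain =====

-- B replaces A's character-by-character temp accumulation with a precomputed
-- table of cut positions followed by slicing between consecutive cuts (objective: simpler).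

-- 'c in VOWELS' for VOWELS = 'aiueo1234('
def pvIsVowel (c : Char) : Bool :=
  ['a','i','u','e','o','1','2','3','4','('].contains c

-- ===== PORT A =====
-- A's loop reads part[i] (the current char) and part[i+1] (the next char) for an
-- in-range i, so the index accesses are rendered exactly as head/next of the
-- remaining suffix; the state (result, temp) and branch order are A's.
def pvSplitAuxA (cs : List Char) (temp : List Char) (res : List (List Char)) :
    List (List Char) :=
  match cs with
  | [] => res                                   -- loop body never runs
  | [c] => res ++ [temp ++ [c]]                 -- i + 1 >= len(part): append, break
  | a :: b :: rest =>
      if pvIsVowel a && pvIsVowel b then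
        pvSplitAuxA (b :: rest) [] (res ++ [temp ++ [a]])
      else
        pvSplitAuxA (b :: rest) (temp ++ [a]) res

def split_by_consecutive_vowels (part : String) : List String :=
  (pvSplitAuxA part.toList [] []).map (fun s => String.mk s)

-- ===== PORT B =====
-- cuts = [i+1 for i in range(len(part)-1) if part[i] in VOWELS and part[i+1] in VOWELS]
def pvCuts (cs : List Char) : List Nat :=
  ((List.range (cs.length - 1)).filter
    (fun i => pvIsVowel (cs.getD i ' ') && pvIsVowel (cs.getD (i + 1) ' '))).map (· + 1)

-- part[start:cut] for 0 ≤ start ≤ cut ≤ len(part): exactly drop-then-take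
def split_by_consecutive_vowels_alt (part : String) : List String :=
  let cs := part.toList
  if cs = [] then []
  else
    let p := (pvCuts cs).foldl
      (fun (st : Nat × List (List Char)) cut =>
        (cut, st.2 ++ [(cs.drop st.1).take (cut - st.1)])) (0, [])
    (p.2 ++ [cs.drop p.1]).map (fun s => String.mk s)

-- ===== PRECONDITION & SPEC =====
def Spec_split_by_consecutive_vowels (part : String) (out : List String) : Prop := out = split_by_consecutive_vowels_alt part
instance (part : String) (out : List String) : Decidable (Spec_split_by_consecutive_vowels part out) := by unfold Spec_split_by_consecutive_vowels; infer_instance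

-- ===== CLAIM (what is proved, stated in full; the proofs are below) =====
def Claim_equal_split_by_consecutive_vowels : Prop := ∀ (part : String), Dom_split_by_consecutive_vowels part → Spec_split_by_consecutive_vowels part (split_by_consecutive_vowels part)

-- ===== LEMMAS AND PROOFS =====

-- common reference shape: structural recursion splitting at vowel-vowel boundaries
def pvGo (cs : List Char) : List (List Char) :=
  match cs with
  | [] => []
  | a :: tl =>
      if (match tl with | b :: _ => pvIsVowel a && pvIsVowel b | [] => false) then
        [a] :: pvGo tl
      else
        match pvGo tl with
        | [] => [[a]]
        | s :: ss => (a :: s) :: ss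

def pvConsFirst (t : List Char) (l : List (List Char)) : List (List Char) :=
  match l with
  | [] => []
  | s :: ss => (t ++ s) :: ss

theorem pvGo_one (a : Char) : pvGo [a] = [[a]] := rfl

theorem pvGo_cons2 (a b : Char) (rest : List Char) :
    pvGo (a :: b :: rest) =
      if pvIsVowel a && pvIsVowel b then [a] :: pvGo (b :: rest)
      else match pvGo (b :: rest) with
        | [] => [[a]]
        | s :: ss => (a :: s) :: ss := rfl

theorem pvGo_ne_nil (cs : List Char) (h : cs ≠ []) : pvGo cs ≠ [] := by
  match cs with
  | [a] => simp [pvGo_one]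
  | a :: b :: rest =>
    rw [pvGo_cons2]
    by_cases hv : (pvIsVowel a && pvIsVowel b) = true
    · rw [if_pos hv]; simp
    · rw [if_neg hv]
      cases pvGo (b :: rest) <;> simp

theorem pvAuxA_eq (cs : List Char) (h : cs ≠ []) :
    ∀ temp res, pvSplitAuxA cs temp res = res ++ pvConsFirst temp (pvGo cs) := by
  induction cs with
  | nil => exact absurd rfl h
  | cons a tl ih =>
    intro temp res
    match tl with
    | [] => simp [pvSplitAuxA, pvGo_one, pvConsFirst]
    | b :: rest =>
      have hne : (b :: rest : List Char) ≠ [] := by simp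
      rw [pvGo_cons2]
      obtain ⟨s, ss, hg⟩ : ∃ s ss, pvGo (b :: rest) = s :: ss := by
        cases hgo : pvGo (b :: rest) with
        | nil => exact absurd hgo (pvGo_ne_nil _ hne)
        | cons s ss => exact ⟨s, ss, rfl⟩
      by_cases hv : (pvIsVowel a && pvIsVowel b) = true
      · rw [if_pos hv]
        show pvSplitAuxA (a :: b :: rest) temp res = _
        simp only [pvSplitAuxA, hv, if_true]
        rw [ih hne]
        simp [hg, pvConsFirst]
      · rw [if_neg hv]
        show pvSplitAuxA (a :: b :: rest) temp res = _
        have hstep : pvSplitAuxA (a :: b :: rest) temp res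
            = pvSplitAuxA (b :: rest) (temp ++ [a]) res := by
          simp [pvSplitAuxA, hv]
        rw [hstep, ih hne]
        simp [hg, pvConsFirst]

-- B-side reference shape of the slicing fold
def pvSegsFrom (cs : List Char) (s : Nat) (cuts : List Nat) : List (List Char) :=
  match cuts with
  | [] => [cs.drop s]
  | c :: cst => (cs.drop s).take (c - s) :: pvSegsFrom cs c cst

theorem pvFold_eq_segsFrom (cs : List Char) :
    ∀ cuts s acc,
      (let p := cuts.foldl
        (fun (st : Nat × List (List Char)) cut =>
          (cut, st.2 ++ [(cs.drop st.1).take (cut - st.1)])) (s, acc)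
       p.2 ++ [cs.drop p.1]) = acc ++ pvSegsFrom cs s cuts := by
  intro cuts
  induction cuts with
  | nil => intro s acc; simp [pvSegsFrom]
  | cons c cst ih =>
    intro s acc
    simp only [List.foldl_cons]
    rw [ih]
    simp [pvSegsFrom]

theorem pvSegsFrom_shift (a : Char) (tl : List Char) :
    ∀ cuts s, pvSegsFrom (a :: tl) (s + 1) (cuts.map (· + 1)) = pvSegsFrom tl s cuts := by
  intro cuts
  induction cuts with
  | nil => intro s; simp [pvSegsFrom]
  | cons c cst ih =>
    intro s
    simp only [List.map_cons, pvSegsFrom, List.drop_succ_cons]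
    rw [ih]
    have h : c + 1 - (s + 1) = c - s := by omega
    rw [h]

theorem pvCuts_cons (a b : Char) (rest : List Char) :
    pvCuts (a :: b :: rest) =
      (if pvIsVowel a && pvIsVowel b then [1] else []) ++ (pvCuts (b :: rest)).map (· + 1) := by
  simp only [pvCuts, List.length_cons, Nat.add_sub_cancel]
  rw [List.range_succ_eq_map]
  simp only [List.filter_cons, List.filter_map, List.map_map, List.getD_cons_zero,
    List.getD_cons_succ]
  by_cases hv : (pvIsVowel a && pvIsVowel b) = true
  · rw [if_pos hv, if_pos hv]
    simp [Function.comp_def, Nat.succ_eq_add_one]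
  · rw [if_neg hv, if_neg hv]
    simp [Function.comp_def, Nat.succ_eq_add_one]

theorem pvSegs_eq_go (cs : List Char) (h : cs ≠ []) :
    pvSegsFrom cs 0 (pvCuts cs) = pvGo cs := by
  induction cs with
  | nil => exact absurd rfl h
  | cons a tl ih =>
    match tl with
    | [] => simp [pvCuts, pvSegsFrom, pvGo_one]
    | b :: rest =>
      have hne : (b :: rest : List Char) ≠ [] := by simp
      rw [pvCuts_cons, pvGo_cons2]
      have hshift := pvSegsFrom_shift a (b :: rest)
      by_cases hv : (pvIsVowel a && pvIsVowel b) = true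
      · rw [if_pos hv, if_pos hv]
        simp only [List.singleton_append, pvSegsFrom, List.drop_zero, Nat.sub_zero,
          List.take_succ_cons, List.take_zero]
        have h1 := hshift (pvCuts (b :: rest)) 0
        norm_num at h1
        rw [h1, ih hne]
      · rw [if_neg hv, if_neg hv, List.nil_append]
        have key : pvSegsFrom (a :: b :: rest) 0 ((pvCuts (b :: rest)).map (· + 1)) =
            pvConsFirst [a] (pvSegsFrom (b :: rest) 0 (pvCuts (b :: rest))) := by
          cases hc : pvCuts (b :: rest) with
          | nil => simp [pvSegsFrom, pvConsFirst]
          | cons c cst =>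
            simp only [List.map_cons, pvSegsFrom, pvConsFirst, List.drop_zero, Nat.sub_zero,
              List.take_succ_cons]
            rw [hshift cst c]
            simp
        rw [key, ih hne]
        cases hgo : pvGo (b :: rest) with
        | nil => exact absurd hgo (pvGo_ne_nil _ hne)
        | cons s ss => simp [pvConsFirst]

-- ===== VERDICT (by name: the statement is the Claim_ definition above) =====
theorem split_by_consecutive_vowels_spec : Claim_equal_split_by_consecutive_vowels := by
  intro part _
  unfold Spec_split_by_consecutive_vowels split_by_consecutive_vowels split_by_consecutive_vowels_alt
  by_cases h : part.toList = []
  · simp [h, pvSplitAuxA]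
  · simp only [h, if_false]
    rw [pvFold_eq_segsFrom part.toList (pvCuts part.toList) 0 []]
    rw [pvAuxA_eq part.toList h [] []]
    rw [pvSegs_eq_go part.toList h]
    cases hgo : pvGo part.toList with
    | nil => exact absurd hgo (pvGo_ne_nil _ h)
    | cons s ss => simp [pvConsFirst]
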